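-- pv_equiv track=rewrite | github.com/erasmus-center-for-biomics/pyngs | pyngs/scripts/vcf/haplotype_vcf.py | haplotype
-- ===== SOURCE A (Python) =====
-- from operator import itemgetter
--
-- def count(lst):
--     """Count the entries in a list."""
--     lst.sort()
--     score = 0
--     pentry = None
--     for entry in lst:
--         if entry != pentry and score:
--             yield pentry, score
--             score = 0
--         pentry = entry
--         score += 1
--     if score:
--         yield pentry, score
--
-- def haplotype(calleles, palleles, malleles):
--     """Haplotype a child with the information from its parents.
--
--     return the paternal and maternal alleles in that order
--     """
--
--     # homozygous child
--     if calleles[0] == calleles[1]: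
--         return calleles[0], calleles[1]
--     # heterozygous child
--     else:
--         # filter all alleles that are not present in the child
--         parental = [a for a in palleles if a in calleles]
--         parental.extend([a for a in malleles if a in calleles])
--
--         allele_count = [t for t in count(parental)]
--         allele_count.sort(key=itemgetter(1))
--
--         # error case where the child has different alleles than the parents
--         if len(allele_count) <= 1:
--             return "E", "E"
--         # unsolvable case where child is Q/P, father is Q/P and mother is Q/P
--         elif allele_count[0][1] == 2:
--             return "?", "?"
--         elif allele_count[0][1] == 1:
--             # case child is Q/P, father is Q/P,
--             # mother is P/P
--             if allele_count[0][0] in palleles: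
--                 return allele_count[0][0], allele_count[1][0]
--             elif allele_count[0][0] in malleles:
--                 return allele_count[1][0], allele_count[0][0]
--     # should never happen
--     return None, None
-- ===== SOURCE B (Python) =====
-- def haplotype(calleles, palleles, malleles):
--     """Haplotype a child with the information from its parents.
--
--     return the paternal and maternal alleles in that order
--     """
--     # homozygous child
--     if calleles[0] == calleles[1]:
--         return calleles[0], calleles[1]
--     # heterozygous child: tally parental alleles present in the child,
--     # then pick the two rarest alleles by selection -- no sorting anywhere
--     parental = [a for a in palleles + malleles if a in calleles]
--     counts = {}
--     for a in parental:
--         counts[a] = counts.get(a, 0) + 1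
--     if len(counts) <= 1:
--         return "E", "E"
--     first = min(counts, key=lambda a: (counts[a], a))
--     if counts[first] == 2:
--         return "?", "?"
--     if counts[first] == 1:
--         second = min((a for a in counts if a != first), key=lambda a: (counts[a], a))
--         if first in palleles:
--             return first, second
--         if first in malleles:
--             return second, first
--     return None, None
-- ===== Notes on version B (the rewrite author's own statement) =====
-- stated objective: alternative
-- what changed: B drops A's sorting entirely: instead of sorting the parental alleles, run-length scanning them into (allele, count) pairs and sorting those pairs by count, B tallies the alleles into a dict in one pass and picks the rarest and second-rarest allele by two linear min-selections with the (count, allele) tuple key.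
import Mathlib
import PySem

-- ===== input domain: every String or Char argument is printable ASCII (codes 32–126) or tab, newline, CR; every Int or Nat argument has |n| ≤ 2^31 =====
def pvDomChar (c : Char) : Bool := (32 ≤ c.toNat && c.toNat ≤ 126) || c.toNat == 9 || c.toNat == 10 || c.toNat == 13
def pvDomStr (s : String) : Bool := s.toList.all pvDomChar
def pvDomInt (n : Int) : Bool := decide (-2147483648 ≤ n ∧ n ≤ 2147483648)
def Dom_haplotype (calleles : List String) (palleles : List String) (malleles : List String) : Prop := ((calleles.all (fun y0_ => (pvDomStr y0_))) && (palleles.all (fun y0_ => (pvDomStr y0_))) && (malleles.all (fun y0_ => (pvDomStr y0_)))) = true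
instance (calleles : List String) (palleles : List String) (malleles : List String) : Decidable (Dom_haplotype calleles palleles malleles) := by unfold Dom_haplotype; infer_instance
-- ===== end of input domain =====

-- ===== PORT A =====
-- B replaces A's sort-based ranking (run-length generator over a sorted copy, then a
-- pair-list sort) by a hash tally plus two linear min-selections; objective: alternative.
-- A-side helper: the body of the 'count' generator's for-loop plus the trailing yield
-- (in the yield branches 'pentry = none' is unreachable in Python, since score ≠ 0
-- forces at least one previous entry; the port returns 'out' unchanged there).
def countLoop : List String → Option String → Int → List (String × Int) → List (String × Int)
  | [], pentry, score, out =>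
      if score ≠ 0 then
        match pentry with
        | some p => out ++ [(p, score)]
        | none => out
      else out
  | entry :: rest, pentry, score, out =>
      if some entry ≠ pentry ∧ score ≠ 0 then
        match pentry with
        | some p => countLoop rest (some entry) 1 (out ++ [(p, score)])
        | none => countLoop rest (some entry) 1 out
      else countLoop rest (some entry) (score + 1) out

-- count(lst): lst.sort() then the run-length loop
def pyCountGen (lst : List String) : List (String × Int) :=
  countLoop (PySem.List.sorted lst (fun a => a) false) none 0 []

def haplotype (calleles : List String) (palleles : List String) (malleles : List String) : Option String × Option String :=
  match PySem.List.pyGet? calleles 0, PySem.List.pyGet? calleles 1 with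
  | some c0, some c1 =>
    if c0 = c1 then (some c0, some c1)
    else
      let parental := palleles.filter (fun a => calleles.contains a) ++ malleles.filter (fun a => calleles.contains a)
      let alleleCount := PySem.List.sorted (pyCountGen parental) (fun t => t.2) false
      if alleleCount.length ≤ 1 then (some "E", some "E")
      else
        match PySem.List.pyGet? alleleCount 0, PySem.List.pyGet? alleleCount 1 with
        | some t0, some t1 =>
          if t0.2 = 2 then (some "?", some "?")
          else if t0.2 = 1 then
            if t0.1 ∈ palleles then (some t0.1, some t1.1)
            else if t0.1 ∈ malleles then (some t1.1, some t0.1)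
            else (none, none)
          else (none, none)
        | _, _ => (none, none)  -- unreachable: alleleCount has ≥ 2 elements here
  | _, _ => (none, none)  -- IndexError (calleles shorter than 2): excluded by Pre_

-- ===== PORT B =====
def haplotype_alt (calleles : List String) (palleles : List String) (malleles : List String) : Option String × Option String :=
  match PySem.List.pyGet? calleles 0 with
  | none => (none, none)  -- IndexError (calleles empty): excluded by Pre_
  | some c0 =>
    match PySem.List.pyGet? calleles 1 with
    | none => (none, none)  -- IndexError (calleles shorter than 2): excluded by Pre_
    | some c1 =>
    if c0 = c1 then (some c0, some c1)
    else
      let parental := (palleles ++ malleles).filter (fun a => calleles.contains a)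
      -- counts[a] = counts.get(a, 0) + 1 over parental
      let counts := parental.foldl (fun d a => d.insert a (d.getD a 0 + 1)) (PySem.Dict.empty : PySem.Dict String Int)
      if counts.size ≤ 1 then (some "E", some "E")
      else
        -- first = min(counts, key=lambda a: (counts[a], a))
        match PySem.List.min2? counts.keys (fun a => counts.getD a 0) (fun a => a) with
        | none => (none, none)  -- unreachable: counts has ≥ 2 keys here
        | some first =>
          if counts.getD first 0 = 2 then (some "?", some "?")
          else if counts.getD first 0 = 1 then
            -- second = min over the remaining keys
            match PySem.List.min2? (counts.keys.filter (fun a => decide (a ≠ first))) (fun a => counts.getD a 0) (fun a => a) with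
            | none => (none, none)  -- unreachable: ≥ 1 key remains
            | some second =>
              if first ∈ palleles then (some first, some second)
              else if first ∈ malleles then (some second, some first)
              else (none, none)
          else (none, none)

-- ===== PRECONDITION & SPEC =====
-- A (and B) raise IndexError on calleles[0]/calleles[1] iff calleles has fewer than 2 elements.
def Pre_haplotype (calleles : List String) (palleles : List String) (malleles : List String) : Prop :=
  2 ≤ calleles.length
instance (calleles : List String) (palleles : List String) (malleles : List String) : Decidable (Pre_haplotype calleles palleles malleles) := by unfold Pre_haplotype; infer_instance
def pvWitness_haplotype : List String × List String × List String := (["A", "B"], ["A", "A"], ["B", "B"])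

def Spec_haplotype (calleles : List String) (palleles : List String) (malleles : List String) (out : Option String × Option String) : Prop := out = haplotype_alt calleles palleles malleles
instance (calleles : List String) (palleles : List String) (malleles : List String) (out : Option String × Option String) : Decidable (Spec_haplotype calleles palleles malleles out) := by unfold Spec_haplotype; infer_instance

-- ===== CLAIM (what is proved, stated in full; the proofs are below) =====
def Claim_equal_haplotype : Prop := ∀ (calleles : List String) (palleles : List String) (malleles : List String), Dom_haplotype calleles palleles malleles → Pre_haplotype calleles palleles malleles → Spec_haplotype calleles palleles malleles (haplotype calleles palleles malleles)

-- ===== LEMMAS AND PROOFS =====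

-- spec-side recursion describing the run-length loop once a first entry has been seen
def runs : List String → String → Int → List (String × Int)
  | [], p, s => [(p, s)]
  | e :: rest, p, s => if e = p then runs rest p (s + 1) else (p, s) :: runs rest e 1

lemma countLoop_eq_runs : ∀ (l : List String) (p : String) (s : Int) (out : List (String × Int)),
    0 < s → countLoop l (some p) s out = out ++ runs l p s := by
  intro l
  induction l with
  | nil => intro p s out hs; simp [countLoop, runs, show s ≠ 0 by omega]
  | cons e rest ih =>
    intro p s out hs
    by_cases he : e = p
    · subst he
      have : countLoop (e :: rest) (some e) s out = countLoop rest (some e) (s + 1) out := by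
        simp [countLoop]
      rw [this, ih e (s+1) out (by omega)]
      simp [runs]
    · have hne : some e ≠ some p := by simpa using he
      have : countLoop (e :: rest) (some p) s out = countLoop rest (some e) 1 (out ++ [(p, s)]) := by
        simp [countLoop, hne, show s ≠ 0 by omega]
      rw [this, ih e 1 (out ++ [(p, s)]) (by omega)]
      simp [runs, he]

lemma runs_spec : ∀ (l : List String) (p : String) (s : Int), l.Pairwise (· ≤ ·) →
    (∀ x ∈ l, p ≤ x) → 0 < s →
    ((runs l p s).map Prod.fst).Pairwise (· < ·) ∧
    (∀ a, a ∈ (runs l p s).map Prod.fst ↔ a = p ∨ a ∈ l) ∧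
    (∀ q ∈ runs l p s, q.2 = (if q.1 = p then s else 0) + (List.count q.1 l : Int)) ∧
    (∀ a ∈ (runs l p s).map Prod.fst, p ≤ a) := by
  intro l
  induction l with
  | nil =>
    intro p s _ _ hs
    refine ⟨?_, ?_, ?_, ?_⟩
    · rw [show runs [] p s = [(p, s)] from rfl]
      exact List.pairwise_singleton _ _
    · intro a; rw [show runs [] p s = [(p, s)] from rfl]; simp
    · intro q hq
      rw [show runs [] p s = [(p, s)] from rfl] at hq
      simp at hq; subst hq; simp
    · intro a ha
      rw [show runs [] p s = [(p, s)] from rfl] at ha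
      simp at ha; subst ha; exact le_refl _
  | cons e rest ih =>
    intro p s hsort hp hs
    have hsort' : rest.Pairwise (· ≤ ·) := hsort.of_cons
    have he_rest : ∀ x ∈ rest, e ≤ x := (List.pairwise_cons.mp hsort).1
    by_cases he : e = p
    · subst he
      have hrw : runs (e :: rest) e s = runs rest e (s + 1) := by simp [runs]
      have H := ih e (s + 1) hsort' he_rest (by omega)
      rw [hrw]
      refine ⟨H.1, ?_, ?_, H.2.2.2⟩
      · intro a
        rw [H.2.1 a, List.mem_cons]
        tauto
      · intro q hq
        have hcur := H.2.2.1 q hq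
        by_cases hqe : q.1 = e
        · rw [hqe] at hcur ⊢
          rw [hcur, List.count_cons]
          simp only [beq_self_eq_true]
          push_cast
          ring
        · rw [if_neg hqe] at hcur ⊢
          rw [List.count_cons]
          have : (e == q.1) = false := by simp [Ne.symm hqe]
          simp [this, hcur]
    · have hpe : p < e := lt_of_le_of_ne (hp e (List.mem_cons_self)) (Ne.symm he)
      have hrw : runs (e :: rest) p s = (p, s) :: runs rest e 1 := by simp [runs, he]
      have H := ih e 1 hsort' he_rest (by omega)
      have hplt : ∀ x ∈ e :: rest, p < x := by
        intro x hx
        rcases List.mem_cons.mp hx with h | h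
        · rw [h]; exact hpe
        · exact lt_of_lt_of_le hpe (he_rest x h)
      rw [hrw]
      refine ⟨?_, ?_, ?_, ?_⟩
      · rw [List.map_cons]
        refine List.pairwise_cons.mpr ⟨?_, H.1⟩
        intro a ha
        exact lt_of_lt_of_le hpe (H.2.2.2 a ha)
      · intro a
        rw [List.map_cons, List.mem_cons, H.2.1 a, List.mem_cons]
      · intro q hq
        rcases List.mem_cons.mp hq with h | h
        · rw [h]
          rw [if_pos rfl]
          have hcnt : List.count p (e :: rest) = 0 := by
            rw [List.count_eq_zero]
            intro hmem
            exact absurd rfl (ne_of_lt (hplt p hmem))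
          rw [hcnt]; simp
        · have hcur := H.2.2.1 q h
          have hqmem : q.1 ∈ (runs rest e 1).map Prod.fst := List.mem_map_of_mem h
          have hqe : e ≤ q.1 := H.2.2.2 q.1 hqmem
          have hqp : q.1 ≠ p := fun hh => absurd (hh ▸ hqe) (not_le.mpr hpe)
          rw [if_neg hqp, List.count_cons]
          by_cases hq1e : q.1 = e
          · rw [if_pos (by simp [hq1e])]
            rw [hq1e] at hcur ⊢
            rw [if_pos rfl] at hcur
            push_cast
            omega
          · rw [if_neg (by simp [Ne.symm hq1e])]
            rw [if_neg hq1e] at hcur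
            simpa using hcur
      · intro a ha
        rw [List.map_cons, List.mem_cons] at ha
        rcases ha with h | h
        · rw [h]
        · exact le_of_lt (lt_of_lt_of_le hpe (H.2.2.2 a h))

-- insertion sort commutes with map when the comparisons correspond
lemma insertBy_map {a b : Type} (f : a → b) (cmp : a → a → Bool) (cmp' : b → b → Bool)
    (h : ∀ x y, cmp' (f x) (f y) = cmp x y) :
    ∀ (x : a) (ys : List a), PySem.List.insertBy cmp' (f x) (ys.map f) = (PySem.List.insertBy cmp x ys).map f := by
  intro x ys
  induction ys with
  | nil => simp [PySem.List.insertBy]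
  | cons y t ih =>
    simp only [List.map_cons, PySem.List.insertBy, h x y]
    by_cases hc : cmp x y
    · simp [hc]
    · simp [hc, ih]

lemma foldl_insertBy_map {a b : Type} (f : a → b) (cmp : a → a → Bool) (cmp' : b → b → Bool)
    (h : ∀ x y, cmp' (f x) (f y) = cmp x y) :
    ∀ (xs acc : List a),
      List.foldl (fun acc x => PySem.List.insertBy cmp' x acc) (acc.map f) (xs.map f)
        = (List.foldl (fun acc x => PySem.List.insertBy cmp x acc) acc xs).map f := by
  intro xs
  induction xs with
  | nil => intro acc; simp
  | cons x t ih =>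
    intro acc
    simp only [List.map_cons, List.foldl_cons]
    rw [insertBy_map f cmp cmp' h, ih]

lemma map_id_pairs (l : List (String × Int)) (f : String × Int → String × Int)
    (h : ∀ x ∈ l, f x = x) : l.map f = l := by
  induction l with
  | nil => rfl
  | cons x t ih =>
    rw [List.map_cons, h x List.mem_cons_self, ih (fun y hy => h y (List.mem_cons_of_mem x hy))]

-- the generator's output is the distinct alleles in ascending order, paired with their counts
lemma pyCountGen_eq (P : List String) :
    pyCountGen P = (PySem.List.sorted (PySem.Set.ofList P) (fun a => a) false).map
      (fun a => (a, (List.count a P : Int))) := by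
  have hsortl : (PySem.List.sorted P (fun a => a) false).Pairwise (· ≤ ·) :=
    PySem.List.sorted_pairwise P (fun a => a)
  rcases hl : PySem.List.sorted P (fun a => a) false with _ | ⟨e, rest⟩
  · have hP : P = [] := by
      have := PySem.List.sorted_perm P (fun a => a) false
      rw [hl] at this
      exact (List.Perm.nil_eq this).symm
    subst hP
    rfl
  · rw [hl] at hsortl
    have hsort' : rest.Pairwise (· ≤ ·) := hsortl.of_cons
    have he_rest : ∀ x ∈ rest, e ≤ x := (List.pairwise_cons.mp hsortl).1
    have hgen : pyCountGen P = runs rest e 1 := by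
      unfold pyCountGen
      rw [hl]
      have h1 : countLoop (e :: rest) none 0 [] = countLoop rest (some e) 1 [] := by
        simp [countLoop]
      rw [h1, countLoop_eq_runs rest e 1 [] (by omega)]
      rfl
    have H := runs_spec rest e 1 hsort' he_rest (by omega)
    set RL := runs rest e 1 with hRL
    set F := RL.map Prod.fst with hF
    have hmemP : ∀ a, a ∈ F ↔ a ∈ P := by
      intro a
      rw [H.2.1 a]
      have : a ∈ P ↔ a ∈ PySem.List.sorted P (fun a => a) false :=
        (PySem.List.mem_sorted P (fun a => a) false a).symm
      rw [this, hl, List.mem_cons]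
    have hnodupF : F.Nodup := H.1.imp (fun hlt => ne_of_lt hlt)
    have hpermF : F.Perm (PySem.Set.ofList P) := by
      rw [List.perm_ext_iff_of_nodup hnodupF (PySem.Set.nodup_ofList P)]
      intro a
      rw [hmemP a, PySem.Set.mem_ofList]
    have hS : PySem.List.sorted (PySem.Set.ofList P) (fun a => a) false = F :=
      PySem.List.sorted_eq_of_perm_of_pairwise_lt (PySem.Set.ofList P) F (fun a => a) hpermF H.1
    rw [hS, hgen, hF, List.map_map]
    symm
    apply map_id_pairs
    intro q hq
    have hcnt := H.2.2.1 q hq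
    have hcountP : List.count q.1 P = List.count q.1 (e :: rest) := by
      have hperm := PySem.List.sorted_perm P (fun a => a) false
      rw [hl] at hperm
      exact (hperm.count_eq q.1).symm
    simp only [Function.comp]
    by_cases hqe : q.1 = e
    · rw [if_pos hqe, hqe] at hcnt
      have : q.2 = (List.count q.1 P : Int) := by
        rw [hcountP, hqe, List.count_cons]
        simp only [beq_self_eq_true, if_true]
        push_cast
        omega
      exact Prod.ext rfl this.symm
    · rw [if_neg hqe] at hcnt
      have : q.2 = (List.count q.1 P : Int) := by
        rw [hcountP, List.count_cons]
        have : (e == q.1) = false := by simp [Ne.symm hqe]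
        simp [this, hcnt]
      exact Prod.ext rfl this.symm

-- A's sorted pair list is the count-sorted distinct-allele list, paired with the counts
lemma alleleCount_eq (P : List String) :
    PySem.List.sorted (pyCountGen P) (fun t => t.2) false
      = (PySem.List.sorted (PySem.List.sorted (PySem.Set.ofList P) (fun a => a) false)
          (fun a => PySem.List.count P a) false).map (fun a => (a, (List.count a P : Int))) := by
  rw [pyCountGen_eq P]
  generalize PySem.List.sorted (PySem.Set.ofList P) (fun a => a) false = S
  rw [PySem.List.sorted_eq_foldl_insertBy, PySem.List.sorted_eq_foldl_insertBy]
  have := foldl_insertBy_map (fun a => (a, (List.count a P : Int)))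
    (fun x y => decide (PySem.List.count P x < PySem.List.count P y))
    (fun x y => decide (x.2 < y.2))
    (by intro x y
        simp [PySem.List.count]) S []
  simpa using this

-- strict lexicographic (count, allele) order used to pin down the selection
def lexC {k : Type} [LinearOrder k] (cnt : String → k) (a b : String) : Prop :=
  cnt a < cnt b ∨ (cnt a = cnt b ∧ a < b)

lemma lexC_irrefl {k : Type} [LinearOrder k] (cnt : String → k) (a : String) : ¬ lexC cnt a a := by
  intro h
  rcases h with h | ⟨_, h⟩
  · exact lt_irrefl _ h
  · exact lt_irrefl _ h

lemma lexC_asymm {k : Type} [LinearOrder k] (cnt : String → k) (a b : String) :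
    lexC cnt a b → ¬ lexC cnt b a := by
  intro h h'
  rcases h with h | ⟨he, h⟩ <;> rcases h' with h' | ⟨he', h'⟩
  · exact lt_asymm h h'
  · rw [he'] at h; exact lt_irrefl _ h
  · rw [he] at h'; exact lt_irrefl _ h'
  · exact lt_asymm h h'

-- a stable sort by count of a strictly (alphabetically) ascending list is strictly
-- lexicographically ((count, allele)) ascending
lemma insertBy_pairwise_lexC {k : Type} [LinearOrder k] [DecidableLT k] (cnt : String → k) (x : String) :
    ∀ (acc : List String), acc.Pairwise (lexC cnt) → (∀ y ∈ acc, y < x) →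
      (PySem.List.insertBy (fun a b => decide (cnt a < cnt b)) x acc).Pairwise (lexC cnt) := by
  intro acc
  induction acc with
  | nil => intro _ _; simp [PySem.List.insertBy]
  | cons y t ih =>
    intro hp hlt
    rw [List.pairwise_cons] at hp
    simp only [PySem.List.insertBy]
    by_cases hc : cnt x < cnt y
    · simp only [hc, decide_true, if_true]
      refine List.pairwise_cons.mpr ⟨?_, List.pairwise_cons.mpr hp⟩
      intro z hz
      rcases List.mem_cons.mp hz with h | h
      · exact Or.inl (h ▸ hc)
      · have hyz := hp.1 z h
        have hle : cnt y ≤ cnt z := by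
          rcases hyz with h' | ⟨h', _⟩
          · exact le_of_lt h'
          · exact le_of_eq h'
        exact Or.inl (lt_of_lt_of_le hc hle)
    · simp only [hc, decide_false, Bool.false_eq_true, if_false]
      refine List.pairwise_cons.mpr ⟨?_, ih hp.2 (fun z hz => hlt z (List.mem_cons_of_mem y hz))⟩
      intro z hz
      rcases (PySem.List.mem_insertBy _ _ _ _).mp hz with h | h
      · subst h
        rcases lt_or_eq_of_le (not_lt.mp hc) with h' | h'
        · exact Or.inl h'
        · exact Or.inr ⟨h', hlt y List.mem_cons_self⟩
      · exact hp.1 z h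

lemma foldl_insertBy_pairwise_lexC {k : Type} [LinearOrder k] [DecidableLT k] (cnt : String → k) :
    ∀ (S acc : List String), S.Pairwise (· < ·) → acc.Pairwise (lexC cnt) →
      (∀ y ∈ acc, ∀ x ∈ S, y < x) →
      (S.foldl (fun acc x => PySem.List.insertBy (fun a b => decide (cnt a < cnt b)) x acc) acc).Pairwise (lexC cnt) := by
  intro S
  induction S with
  | nil => intro acc _ h _; simpa using h
  | cons x rest ih =>
    intro acc hS hacc hsep
    rw [List.pairwise_cons] at hS
    rw [List.foldl_cons]
    apply ih _ hS.2
    · exact insertBy_pairwise_lexC cnt x acc hacc (fun y hy => hsep y hy x List.mem_cons_self)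
    · intro y hy z hz
      rcases (PySem.List.mem_insertBy _ _ _ _).mp hy with h | h
      · exact h ▸ hS.1 z hz
      · exact hsep y h z (List.mem_cons_of_mem x hz)

lemma sorted_pairwise_lexC {k : Type} [LinearOrder k] [DecidableLT k] (cnt : String → k)
    (S : List String) (hS : S.Pairwise (· < ·)) :
    (PySem.List.sorted S cnt false).Pairwise (lexC cnt) := by
  rw [PySem.List.sorted_eq_foldl_insertBy]
  exact foldl_insertBy_pairwise_lexC cnt S [] hS List.Pairwise.nil (by simp)

-- Python's min with the tuple key (cnt a, a) returns the unique lexC-least element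
lemma min2_fold_gen {k : Type} [LinearOrder k] (cnt : String → k)
    (f : Option String → String → Option String)
    (hf1 : ∀ p x, lexC cnt x p → f (some p) x = some x)
    (hf2 : ∀ p x, ¬ lexC cnt x p → f (some p) x = some p) :
    ∀ (xs : List String) (c m : String), (m = c ∨ m ∈ xs) →
      (∀ y, (y = c ∨ y ∈ xs) → y = m ∨ lexC cnt m y) →
      List.foldl f (some c) xs = some m := by
  intro xs
  induction xs with
  | nil =>
    intro c m hm _
    rcases hm with h | h
    · rw [h]; rfl
    · simp at h
  | cons x t ih =>
    intro c m hm hmin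
    rw [List.foldl_cons]
    by_cases hc : lexC cnt x c
    · rw [hf1 c x hc]
      apply ih x m
      · rcases hm with h | h
        · exfalso
          rcases hmin x (Or.inr List.mem_cons_self) with hx | hx
          · rw [hx, h] at hc; exact lexC_irrefl cnt c hc
          · rw [h] at hx; exact lexC_asymm cnt x c hc hx
        · exact List.mem_cons.mp h
      · intro y hy
        apply hmin
        rcases hy with h | h
        · exact Or.inr (h ▸ List.mem_cons_self)
        · exact Or.inr (List.mem_cons_of_mem x h)
    · rw [hf2 c x hc]
      apply ih c m
      · rcases hm with h | h
        · exact Or.inl h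
        · rcases List.mem_cons.mp h with h' | h'
          · rcases hmin c (Or.inl rfl) with h'' | h''
            · exact Or.inl h''.symm
            · exact absurd (h' ▸ h'') hc
          · exact Or.inr h'
      · intro y hy
        apply hmin
        rcases hy with h | h
        · exact Or.inl h
        · exact Or.inr (List.mem_cons_of_mem x h)

lemma lexC_iff_decide {k : Type} [LinearOrder k] [DecidableLT k] (cnt : String → k) (x c : String) :
    lexC cnt x c ↔ (decide (cnt x < cnt c) || !decide (cnt c < cnt x) && decide (x < c)) = true := by
  unfold lexC
  simp only [Bool.or_eq_true, Bool.and_eq_true, Bool.not_eq_true', decide_eq_true_eq,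
    decide_eq_false_iff_not, not_lt]
  constructor
  · rintro (h | ⟨h1, h2⟩)
    · exact Or.inl h
    · exact Or.inr ⟨le_of_eq h1, h2⟩
  · rintro (h | ⟨h1, h2⟩)
    · exact Or.inl h
    · rcases eq_or_lt_of_le h1 with he | hl
      · exact Or.inr ⟨he, h2⟩
      · exact Or.inl hl

lemma min2?_eq_of_least {k : Type} [LinearOrder k] [DecidableLT k] (cnt : String → k)
    (xs : List String) (m : String)
    (hm : m ∈ xs) (hmin : ∀ y ∈ xs, y = m ∨ lexC cnt m y) :
    PySem.List.min2? xs cnt (fun a => a) = some m := by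
  rcases xs with _ | ⟨x, t⟩
  · simp at hm
  · show List.foldl _ none (x :: t) = some m
    rw [List.foldl_cons]
    refine min2_fold_gen cnt _ ?_ ?_ t x m (by simpa using hm)
      (fun y hy => hmin y (by rcases hy with h | h
                              · exact h ▸ List.mem_cons_self
                              · exact List.mem_cons_of_mem x h))
    · intro p z h
      show (if (decide (cnt z < cnt p) || !decide (cnt p < cnt z) && decide (z < p)) = true
            then some z else some p) = some z
      rw [if_pos ((lexC_iff_decide cnt z p).mp h)]
    · intro p z h
      show (if (decide (cnt z < cnt p) || !decide (cnt p < cnt z) && decide (z < p)) = true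
            then some z else some p) = some p
      rw [if_neg (fun hh => h ((lexC_iff_decide cnt z p).mpr hh))]

-- ===== VERDICT (by name: the statement is the Claim_ definition above) =====
theorem haplotype_spec : Claim_equal_haplotype := by
  intro calleles palleles malleles _ hpre
  unfold Spec_haplotype
  match calleles, hpre with
  | c0 :: c1 :: ct, _ =>
    have h0 : PySem.List.pyGet? (c0 :: c1 :: ct) 0 = some c0 := by simp
    have h1 : PySem.List.pyGet? (c0 :: c1 :: ct) 1 = some c1 := by simp
    rw [haplotype, haplotype_alt, h0, h1]
    by_cases hc : c0 = c1
    · simp [hc]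
    · simp only [if_neg hc]
      set cs := c0 :: c1 :: ct with hcs
      set P := palleles.filter (fun a => cs.contains a) ++ malleles.filter (fun a => cs.contains a) with hP
      have hfil : (palleles ++ malleles).filter (fun a => cs.contains a) = P := List.filter_append ..
      rw [hfil]
      -- B's dict is Counter(P)
      have hctr : P.foldl (fun d a => d.insert a (d.getD a 0 + 1)) (PySem.Dict.empty : PySem.Dict String Int) = PySem.Dict.counter P :=
        PySem.Dict.foldl_insert_getD_add_one_eq_counter P
      rw [hctr]
      set D := PySem.Dict.counter P with hD
      have hkeys : D.keys = PySem.Set.ofList P := PySem.Dict.keys_counter P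
      have hgetD : ∀ a, D.getD a 0 = (List.count a P : Int) := fun a => PySem.Dict.getD_counter P a
      -- A's sorted pair list
      set S := PySem.List.sorted (PySem.Set.ofList P) (fun a => a) false with hS
      set T := PySem.List.sorted S (fun a => PySem.List.count P a) false with hT
      have hAC : PySem.List.sorted (pyCountGen P) (fun t => t.2) false
          = T.map (fun a => (a, (List.count a P : Int))) := alleleCount_eq P
      rw [hAC, List.length_map]
      have hTperm : T.Perm (PySem.Set.ofList P) :=
        (PySem.List.sorted_perm S _ false).trans (PySem.List.sorted_perm _ _ false)
      have hsize : D.size = T.length := by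
        have h1 : D.size = D.keys.length := by
          simp [PySem.Dict.size, PySem.Dict.keys]
        rw [h1, hkeys, hTperm.length_eq]
      rw [hsize]
      by_cases hlen : T.length ≤ 1
      · simp [hlen]
      · simp only [if_neg hlen]
        have hlen2 : 2 ≤ T.length := by omega
        have hTnodup : T.Nodup := hTperm.nodup_iff.mpr (PySem.Set.nodup_ofList P)
        have hTpairN : T.Pairwise (lexC (fun a => PySem.List.count P a)) :=
          sorted_pairwise_lexC _ S (PySem.List.sorted_ofList_pairwise_lt P)
        -- transport the lexicographic order to B's dict-lookup key (Int-cast counts)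
        have hTpair : T.Pairwise (lexC (fun a => ((List.count a P : Nat) : Int))) := by
          refine hTpairN.imp ?_
          intro a b h
          rcases h with h | ⟨he, hs⟩
          · left
            show ((List.count a P : Nat) : Int) < ((List.count b P : Nat) : Int)
            have h' : List.count a P < List.count b P := h
            exact_mod_cast h'
          · right
            refine ⟨?_, hs⟩
            show ((List.count a P : Nat) : Int) = ((List.count b P : Nat) : Int)
            have he' : List.count a P = List.count b P := he
            exact_mod_cast he'
        have hmemT : ∀ a, a ∈ D.keys ↔ a ∈ T := by
          intro a
          rw [hkeys]
          exact (hTperm.mem_iff).symm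
        match T, hlen2, hTnodup, hTpair, hmemT with
        | m :: m2 :: rest, _, hTnodup, hTpair, hmemT =>
          have g0 : PySem.List.pyGet? ((m :: m2 :: rest).map (fun a => (a, (List.count a P : Int)))) 0
              = some (m, (List.count m P : Int)) := by simp
          have g1 : PySem.List.pyGet? ((m :: m2 :: rest).map (fun a => (a, (List.count a P : Int)))) 1
              = some (m2, (List.count m2 P : Int)) := by simp
          rw [List.pairwise_cons] at hTpair
          -- first = m
          have hfirst : PySem.List.min2? D.keys (fun a => ((List.count a P : Nat) : Int)) (fun a => a) = some m := by
            apply min2?_eq_of_least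
            · exact (hmemT m).mpr List.mem_cons_self
            · intro y hy
              rcases List.mem_cons.mp ((hmemT y).mp hy) with h | h
              · exact Or.inl h
              · exact Or.inr (hTpair.1 y h)
          simp only [g0, g1, hgetD, hfirst]
          by_cases h2 : List.count m P = 2
          · simp [h2]
          · have h2' : ((List.count m P : Int)) ≠ 2 := by exact_mod_cast h2
            simp only [if_neg h2']
            by_cases hone : List.count m P = 1
            · have hone' : ((List.count m P : Int)) = 1 := by exact_mod_cast hone
              simp only [hone']
              -- second = m2
              have hm_not : m ∉ m2 :: rest := (List.nodup_cons.mp hTnodup).1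
              rw [List.pairwise_cons] at hTpair
              have hsecond : PySem.List.min2? (D.keys.filter (fun a => decide (a ≠ m)))
                  (fun a => ((List.count a P : Nat) : Int)) (fun a => a) = some m2 := by
                apply min2?_eq_of_least
                · rw [List.mem_filter]
                  refine ⟨(hmemT m2).mpr (List.mem_cons_of_mem m List.mem_cons_self), ?_⟩
                  simp only [decide_eq_true_eq]
                  intro hh
                  exact hm_not (hh ▸ List.mem_cons_self)
                · intro y hy
                  rw [List.mem_filter] at hy
                  have hyT := (hmemT y).mp hy.1
                  have hym : y ≠ m := by simpa using hy.2
                  rcases List.mem_cons.mp hyT with h | h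
                  · exact absurd h hym
                  · rcases List.mem_cons.mp h with h' | h'
                    · exact Or.inl h'
                    · exact Or.inr (hTpair.2.1 y h')
              simp only [hsecond]

            · have hone' : ((List.count m P : Int)) ≠ 1 := by exact_mod_cast hone
              simp [hone']
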